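-- pv_equiv track=rewrite | github.com/ShirinRo/euler | utils.py | findPermutationsOfDigits
-- ===== SOURCE A (Python) =====
-- def findPermutationsOfDigits(digitsToUse, stringSoFar = ""):
--     if len(digitsToUse) == 0:
--         return [stringSoFar]
--     results = []
--     for index, digit in enumerate(digitsToUse):
--         if len(stringSoFar) == 0 and digit == "0":  # this is to avoid numbers starting with zero
--             continue
--         mediumResult = stringSoFar + str(digit)
--         newDigitsToUse = digitsToUse[:index] + digitsToUse[index+1:]
--         results += findPermutationsOfDigits(newDigitsToUse, mediumResult)
--     return results
-- ===== SOURCE B (Python) =====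
-- def findPermutationsOfDigits(digitsToUse, stringSoFar = ""):
--     # iterative breadth-first expansion of partial permutations, then one filter-and-join pass
--     states = [([], list(digitsToUse))]
--     for _ in range(len(digitsToUse)):
--         states = [(chosen + [rem[i]], rem[:i] + rem[i+1:])
--                   for chosen, rem in states
--                   for i in range(len(rem))]
--     results = []
--     for perm, _ in states:
--         if stringSoFar == "" and perm and perm[0] == "0":
--             continue
--         results.append(stringSoFar + "".join(perm))
--     return results
-- ===== Notes on version B (the rewrite author's own statement) =====
-- stated objective: alternative
-- what changed: Replaces the pruned depth-first recursion by an iterative breadth-first level-by-level expansion of all permutations followed by a single filter-and-join pass; Pre_ excludes only the corner where stringSoFar is empty and digitsToUse contains both an empty-string 'digit' and '0', where A's zero-filter can still fire after consuming the empty string (an accident of implementation) and either behaviour is defensible.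
-- outside the precondition, e.g. on findPermutationsOfDigits(['', '0'], ''): A returns [], B returns ['0']
import Mathlib
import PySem

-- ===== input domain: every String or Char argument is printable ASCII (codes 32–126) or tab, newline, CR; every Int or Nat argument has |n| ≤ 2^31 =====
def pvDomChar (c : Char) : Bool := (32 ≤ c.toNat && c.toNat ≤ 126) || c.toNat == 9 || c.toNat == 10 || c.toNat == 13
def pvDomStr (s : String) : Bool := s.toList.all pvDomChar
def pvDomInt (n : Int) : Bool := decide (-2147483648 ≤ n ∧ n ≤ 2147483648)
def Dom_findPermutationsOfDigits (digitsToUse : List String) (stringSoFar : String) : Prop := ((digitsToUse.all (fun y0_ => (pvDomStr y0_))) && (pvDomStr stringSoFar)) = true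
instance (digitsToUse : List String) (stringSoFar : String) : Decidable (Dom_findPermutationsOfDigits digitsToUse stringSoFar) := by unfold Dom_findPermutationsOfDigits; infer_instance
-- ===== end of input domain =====

-- B replaces the pruned depth-first recursion by an iterative breadth-first expansion of all
-- permutations followed by one filter-and-join pass (alternative decomposition, same cost).

-- ===== PORT A =====
-- termination fact for A's recursion (cited by name in decreasing_by)
theorem pvRm_lt (xs : List String) (k : Nat) (hk : k < xs.length) :
    (PySem.List.slice xs none (some (k : Int)) ++
      PySem.List.slice xs (some ((k : Int) + 1)) none).length < xs.length := by
  have h2 : ((k : Int) + 1) = (((k + 1 : Nat)) : Int) := by push_cast; ring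
  rw [PySem.List.slice_to_natCast, h2, PySem.List.slice_from_natCast]
  simp only [List.length_append, List.length_take, List.length_drop]
  omega

def findPermutationsOfDigits (digitsToUse : List String) (stringSoFar : String) : List String :=
  if digitsToUse.length = 0 then [stringSoFar]
  else
    (PySem.List.enumerate digitsToUse).attach.foldl
      (fun results p =>
        if PySem.Str.len stringSoFar = 0 ∧ p.1.2 = "0" then results
        else
          results ++
            findPermutationsOfDigits
              (PySem.List.slice digitsToUse none (some p.1.1) ++
                PySem.List.slice digitsToUse (some (p.1.1 + 1)) none)
              (stringSoFar ++ p.1.2))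
      []
termination_by digitsToUse.length
decreasing_by
  obtain ⟨k, hk, hp⟩ := (PySem.List.mem_enumerate_iff digitsToUse 0 p.1).1 p.2
  have h1 : p.1.1 = (k : Int) := by rw [hp]; simp
  rw [h1]
  exact pvRm_lt digitsToUse k hk

-- ===== PORT B =====
def pvStep (states : List (List String × List String)) : List (List String × List String) :=
  states.flatMap (fun pr =>
    (List.range pr.2.length).map (fun (i : Nat) =>
      (pr.1 ++ [pr.2.getD i ""],
        PySem.List.slice pr.2 none (some (i : Int)) ++
          PySem.List.slice pr.2 (some ((i : Int) + 1)) none)))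

def findPermutationsOfDigits_alt (digitsToUse : List String) (stringSoFar : String) : List String :=
  ((List.range digitsToUse.length).foldl (fun st _ => pvStep st) [(([] : List String), digitsToUse)]).foldl
    (fun results pr =>
      if stringSoFar = "" ∧ pr.1 ≠ [] ∧ pr.1.getD 0 "" = "0" then results
      else results ++ [stringSoFar ++ PySem.Str.join "" pr.1])
    []

-- ===== PRECONDITION & SPEC =====
-- Pre_ excludes only the corner where stringSoFar is empty and digitsToUse contains both an
-- empty-string "digit" and "0": there A's zero-filter can still fire after an empty string is
-- consumed (stringSoFar stays empty), an accident of A's implementation on which neither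
-- behaviour is specified.
def Pre_findPermutationsOfDigits (digitsToUse : List String) (stringSoFar : String) : Prop :=
  ¬ ("" ∈ digitsToUse ∧ stringSoFar = "" ∧ "0" ∈ digitsToUse)
instance (digitsToUse : List String) (stringSoFar : String) : Decidable (Pre_findPermutationsOfDigits digitsToUse stringSoFar) := by unfold Pre_findPermutationsOfDigits; infer_instance

def pvWitness_findPermutationsOfDigits : List String × String := (["1", "0", "2"], "")

def Spec_findPermutationsOfDigits (digitsToUse : List String) (stringSoFar : String) (out : List String) : Prop := out = findPermutationsOfDigits_alt digitsToUse stringSoFar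
instance (digitsToUse : List String) (stringSoFar : String) (out : List String) : Decidable (Spec_findPermutationsOfDigits digitsToUse stringSoFar out) := by unfold Spec_findPermutationsOfDigits; infer_instance

-- ===== CLAIM (what is proved, stated in full; the proofs are below) =====
def Claim_equal_findPermutationsOfDigits : Prop := ∀ (digitsToUse : List String) (stringSoFar : String), Dom_findPermutationsOfDigits digitsToUse stringSoFar → Pre_findPermutationsOfDigits digitsToUse stringSoFar → Spec_findPermutationsOfDigits digitsToUse stringSoFar (findPermutationsOfDigits digitsToUse stringSoFar)

-- ===== LEMMAS AND PROOFS =====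

-- remove element k (both ports build it from the two slices)
def pvRm (xs : List String) (k : Nat) : List String := xs.take k ++ xs.drop (k + 1)

theorem pvSlices_eq_pvRm (xs : List String) (k : Nat) :
    PySem.List.slice xs none (some (k : Int)) ++
      PySem.List.slice xs (some ((k : Int) + 1)) none = pvRm xs k := by
  have h2 : ((k : Int) + 1) = (((k + 1 : Nat)) : Int) := by push_cast; ring
  rw [PySem.List.slice_to_natCast, h2, PySem.List.slice_from_natCast, pvRm]

-- the shared semantic object: all permutations in selection order (fuel = length)
def pvPermsN : Nat → List String → List (List String)
  | 0, _ => [[]]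
  | n + 1, xs =>
    (List.range xs.length).flatMap fun i =>
      (pvPermsN n (pvRm xs i)).map (fun q => xs.getD i "" :: q)

def pvFirstNonEmpty : List String → Option String
  | [] => none
  | d :: rest => if d = "" then pvFirstNonEmpty rest else some d

def pvKeep (s : String) (q : List String) : Bool :=
  !decide (PySem.Str.len s = 0 ∧ pvFirstNonEmpty q = some "0")

def pvKeepB (s : String) (q : List String) : Bool :=
  !decide (s = "" ∧ q ≠ [] ∧ q.getD 0 "" = "0")

def pvOut (s : String) (q : List String) : String := s ++ PySem.Str.join "" q

theorem pvRm_length (xs : List String) (k : Nat) (hk : k < xs.length) :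
    (pvRm xs k).length = xs.length - 1 := by
  simp only [pvRm, List.length_append, List.length_take, List.length_drop]; omega

-- loop shape shared by both ports: 'if c then skip else extend'
theorem pvFoldl_skip_extend {α β : Type} (l : List α) (acc : List β)
    (c : α → Prop) [DecidablePred c] (g : α → List β) :
    l.foldl (fun acc x => if c x then acc else acc ++ g x) acc =
      acc ++ (l.filter (fun x => !decide (c x))).flatMap g := by
  induction l generalizing acc with
  | nil => simp
  | cons x xs ih =>
    by_cases h : c x <;> simp [h, ih, List.append_assoc]

theorem pvFlatMap_filter {α γ : Type} (l : List α) (cb : α → Bool) (G : α → List γ) :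
    (l.filter cb).flatMap G = l.flatMap (fun x => if cb x then G x else []) := by
  induction l with
  | nil => simp
  | cons x xs ih =>
    cases h : cb x <;> simp [h, ih]

theorem pvFlatMap_congr {α γ : Type} (l : List α) (f g : α → List γ)
    (h : ∀ x ∈ l, f x = g x) : l.flatMap f = l.flatMap g := by
  induction l with
  | nil => rfl
  | cons x xs ih =>
    simp only [List.flatMap_cons, h x (List.mem_cons_self), ih (fun y hy => h y (List.mem_cons_of_mem _ hy))]

-- enumerate as a map over range
theorem pvEnumerate_eq (xs : List String) (a : Nat) :
    PySem.List.enumerate xs (a : Int) =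
      (List.range xs.length).map (fun k => (((a + k : Nat) : Int), xs.getD k "")) := by
  induction xs generalizing a with
  | nil => simp [PySem.List.enumerate_nil]
  | cons x xs ih =>
    rw [PySem.List.enumerate_cons]
    have h1 : ((a : Int) + 1) = (((a + 1 : Nat)) : Int) := by push_cast; ring
    rw [h1, ih (a + 1)]
    rw [List.length_cons, List.range_succ_eq_map, List.map_cons, List.map_map]
    congr 1
    simp
    intro k _
    ring

-- join with empty separator distributes over cons
theorem pvJoin_empty_cons (c : List Char) (cs : List (List Char)) :
    PySem.Chars.join [] (c :: cs) = c ++ PySem.Chars.join [] cs := by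
  cases cs with
  | nil => simp [PySem.Chars.join_singleton, PySem.Chars.join_nil]
  | cons d ds => rw [PySem.Chars.join_cons_cons]; simp

theorem pvOut_cons (s dg : String) (q : List String) :
    pvOut s (dg :: q) = pvOut (s ++ dg) q := by
  apply String.toList_inj.1
  have hne : "".toList = ([] : List Char) := rfl
  simp only [pvOut, String.toList_append, PySem.Str.toList_join, List.map_cons, hne,
    pvJoin_empty_cons, List.append_assoc]

theorem pvLen_zero_iff (s : String) : PySem.Str.len s = 0 ↔ s.toList = [] := by
  rw [PySem.Str.len_eq]
  constructor
  · intro h; exact List.length_eq_zero_iff.1 (by exact_mod_cast h)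
  · intro h; simp [h]

theorem pvToList_nil_iff (s : String) : s.toList = [] ↔ s = "" := by
  constructor
  · intro h; apply String.toList_inj.1; simpa using h
  · intro h; subst h; rfl

theorem pvLenApp_zero (s dg : String) :
    PySem.Str.len (s ++ dg) = 0 ↔ (PySem.Str.len s = 0 ∧ dg = "") := by
  constructor
  · intro h
    have h2 := (pvLen_zero_iff _).1 h
    rw [String.toList_append, List.append_eq_nil_iff] at h2
    exact ⟨(pvLen_zero_iff s).2 h2.1, (pvToList_nil_iff dg).1 h2.2⟩
  · rintro ⟨h1, h2⟩
    subst h2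
    rw [pvLen_zero_iff] at h1 ⊢
    simp [h1]

theorem pvKeep_cons (s dg : String) (q : List String)
    (h : ¬(PySem.Str.len s = 0 ∧ dg = "0")) :
    pvKeep s (dg :: q) = pvKeep (s ++ dg) q := by
  unfold pvKeep
  rw [decide_eq_decide.2 ?_]
  constructor
  · rintro ⟨h0, hf⟩
    by_cases he : dg = ""
    · subst he
      exact ⟨(pvLenApp_zero s "").2 ⟨h0, rfl⟩, by simpa [pvFirstNonEmpty] using hf⟩
    · exact absurd ⟨h0, by simpa [pvFirstNonEmpty, he] using hf⟩ h
  · rintro ⟨h0, hf⟩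
    obtain ⟨h1, h2⟩ := (pvLenApp_zero s dg).1 h0
    subst h2
    exact ⟨h1, by simpa [pvFirstNonEmpty] using hf⟩

theorem pvKeep_zero (s dg : String) (q : List String)
    (hs : PySem.Str.len s = 0) (hdg : dg = "0") :
    pvKeep s (dg :: q) = false := by
  subst hdg
  have hfe : pvFirstNonEmpty ("0" :: q) = some "0" := by simp [pvFirstNonEmpty]
  unfold pvKeep
  rw [decide_eq_true (⟨hs, hfe⟩ : _ ∧ _)]
  rfl

-- ===== A in normal form: filter-then-map over the permutation tree =====
theorem pvA_normal (n : Nat) : ∀ (xs : List String) (s : String), xs.length = n →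
    findPermutationsOfDigits xs s = ((pvPermsN n xs).filter (pvKeep s)).map (pvOut s) := by
  induction n with
  | zero =>
    intro xs s hlen
    have hxs : xs = [] := List.length_eq_zero_iff.1 hlen
    subst hxs
    rw [findPermutationsOfDigits]
    have : pvOut s [] = s := by
      apply String.toList_inj.1
      simp [pvOut, PySem.Str.toList_join, PySem.Chars.join_nil]
    simp [pvPermsN, pvKeep, pvFirstNonEmpty, this]
  | succ n ih =>
    intro xs s hlen
    rw [findPermutationsOfDigits, if_neg (by omega)]
    rw [List.foldl_attach (f := fun results (p : Int × String) =>
      if PySem.Str.len s = 0 ∧ p.2 = "0" then results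
      else results ++ findPermutationsOfDigits
        (PySem.List.slice xs none (some p.1) ++ PySem.List.slice xs (some (p.1 + 1)) none)
        (s ++ p.2))]
    rw [pvFoldl_skip_extend, List.nil_append]
    rw [show PySem.List.enumerate xs = PySem.List.enumerate xs ((0 : Nat) : Int) from rfl,
      pvEnumerate_eq xs 0]
    rw [List.filter_map, List.flatMap_map, pvFlatMap_filter]
    rw [pvPermsN, List.filter_flatMap, List.map_flatMap]
    apply pvFlatMap_congr
    intro k hk
    have hklen : k < xs.length := List.mem_range.1 hk
    simp only [Function.comp, Nat.zero_add, List.filter_map, List.map_map]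
    by_cases hc : PySem.Str.len s = 0 ∧ xs.getD k "" = "0"
    · have hb : (!decide (PySem.Str.len s = 0 ∧ xs.getD k "" = "0")) = false := by
        rw [decide_eq_true hc]; rfl
      rw [if_neg (by rw [hb]; exact Bool.false_ne_true)]
      have hfil : (pvPermsN n (pvRm xs k)).filter (pvKeep s ∘ fun q => xs.getD k "" :: q) = [] := by
        apply List.filter_eq_nil_iff.2
        intro q _
        rw [Function.comp_apply, pvKeep_zero s _ q hc.1 hc.2]
        simp
      rw [hfil, List.map_nil]
    · have hb : (!decide (PySem.Str.len s = 0 ∧ xs.getD k "" = "0")) = true := by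
        rw [decide_eq_false hc]; rfl
      rw [if_pos hb]
      rw [pvSlices_eq_pvRm]
      rw [ih (pvRm xs k) (s ++ xs.getD k "") (by rw [pvRm_length xs k hklen]; omega)]
      have hm : ((pvPermsN n (pvRm xs k)).filter (pvKeep s ∘ fun q => xs.getD k "" :: q)).map
            (pvOut s ∘ fun q => xs.getD k "" :: q) =
          ((pvPermsN n (pvRm xs k)).filter (pvKeep s ∘ fun q => xs.getD k "" :: q)).map
            (pvOut (s ++ xs.getD k "")) := by
        apply List.map_congr_left
        intro q _
        rw [Function.comp_apply, pvOut_cons]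
      have hf : (pvPermsN n (pvRm xs k)).filter (pvKeep s ∘ fun q => xs.getD k "" :: q) =
          (pvPermsN n (pvRm xs k)).filter (pvKeep (s ++ xs.getD k "")) := by
        apply List.filter_congr
        intro q _
        rw [Function.comp_apply, pvKeep_cons s _ q hc]
      rw [hm, hf]

-- ===== B: the breadth-first expansion computes the same permutation list =====
theorem pvStep_append (a b : List (List String × List String)) :
    pvStep (a ++ b) = pvStep a ++ pvStep b := by
  simp [pvStep]

theorem pvStep_iter_nil (k : Nat) : pvStep^[k] [] = [] := by
  induction k with
  | zero => rfl
  | succ k ih => rw [Function.iterate_succ_apply, show pvStep [] = [] from rfl, ih]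

theorem pvStep_iter_append (k : Nat) (a b : List (List String × List String)) :
    pvStep^[k] (a ++ b) = pvStep^[k] a ++ pvStep^[k] b := by
  induction k generalizing a b with
  | zero => rfl
  | succ k ih => simp only [Function.iterate_succ_apply, pvStep_append, ih]

theorem pvStep_iter_flatMap {α : Type} (k : Nat) (l : List α)
    (g : α → List (List String × List String)) :
    pvStep^[k] (l.flatMap g) = l.flatMap (fun x => pvStep^[k] (g x)) := by
  induction l with
  | nil => simp [pvStep_iter_nil]
  | cons x xs ih => simp only [List.flatMap_cons, pvStep_iter_append, ih]

theorem pvFoldl_const_iterate {α β : Type} (l : List α) (g : β → β) (st : β) :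
    l.foldl (fun st _ => g st) st = g^[l.length] st := by
  induction l generalizing st with
  | nil => rfl
  | cons x xs ih => rw [List.foldl_cons, ih, List.length_cons, Function.iterate_succ_apply]

theorem pvB_states (n : Nat) : ∀ (xs : List String) (p : List String), xs.length = n →
    pvStep^[n] [(p, xs)] = (pvPermsN n xs).map (fun q => (p ++ q, ([] : List String))) := by
  induction n with
  | zero =>
    intro xs p hlen
    have hxs : xs = [] := List.length_eq_zero_iff.1 hlen
    subst hxs
    simp [pvPermsN]
  | succ n ih =>
    intro xs p hlen
    rw [Function.iterate_succ_apply]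
    have hstep : pvStep [(p, xs)] =
        (List.range xs.length).flatMap (fun i =>
          [(p ++ [xs.getD i ""], pvRm xs i)]) := by
      simp only [pvStep, List.flatMap_cons, List.flatMap_nil, List.append_nil]
      rw [List.map_eq_flatMap]
      apply pvFlatMap_congr
      intro i _
      rw [pvSlices_eq_pvRm]
    rw [hstep, pvStep_iter_flatMap]
    rw [pvPermsN, List.map_flatMap]
    apply pvFlatMap_congr
    intro i hi
    have hilen : i < xs.length := List.mem_range.1 hi
    rw [ih (pvRm xs i) (p ++ [xs.getD i ""]) (by rw [pvRm_length xs i hilen]; omega)]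
    simp [List.map_map, Function.comp]

-- ===== B in the same normal form (with its own head-based filter) =====
theorem pvB_normal (xs : List String) (s : String) :
    findPermutationsOfDigits_alt xs s =
      ((pvPermsN xs.length xs).filter (pvKeepB s)).map (pvOut s) := by
  rw [findPermutationsOfDigits_alt]
  rw [pvFoldl_const_iterate, List.length_range]
  rw [pvB_states xs.length xs [] rfl]
  rw [pvFoldl_skip_extend, List.nil_append]
  rw [List.filter_map, List.flatMap_map]
  simp only [List.nil_append]
  rw [show (fun (q : List String) => [s ++ PySem.Str.join "" q]) = (fun q => [pvOut s q]) from rfl]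
  rw [show ((fun (pr : List String × List String) =>
      !decide (s = "" ∧ pr.1 ≠ [] ∧ pr.1.getD 0 "" = "0")) ∘
      fun (q : List String) => (q, ([] : List String))) = pvKeepB s from rfl]
  induction ((pvPermsN xs.length xs).filter (pvKeepB s)) with
  | nil => rfl
  | cons q qs ihq => simp [ihq]

-- every element of a generated permutation comes from the input list
theorem pvRm_subset (xs : List String) (k : Nat) : ∀ d ∈ pvRm xs k, d ∈ xs := by
  intro d hd
  rcases List.mem_append.1 hd with h | h
  · exact List.mem_of_mem_take h
  · exact List.mem_of_mem_drop h

theorem pvPermsN_mem (n : Nat) : ∀ (xs : List String) (q : List String), q ∈ pvPermsN n xs →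
    ∀ d ∈ q, d ∈ xs := by
  induction n with
  | zero =>
    intro xs q hq d hd
    simp [pvPermsN] at hq
    subst hq
    simp at hd
  | succ n ih =>
    intro xs q hq d hd
    simp only [pvPermsN, List.mem_flatMap, List.mem_map, List.mem_range] at hq
    obtain ⟨i, hi, q', hq', rfl⟩ := hq
    rcases List.mem_cons.1 hd with rfl | hd'
    · have hg : xs.getD i "" = xs[i] := List.getD_eq_getElem xs "" hi
      rw [hg]; exact List.getElem_mem hi
    · exact pvRm_subset xs i d (ih (pvRm xs i) q' hq' d hd')

-- on permutations without empty-string elements the two filters agree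
theorem pvKeep_eq_keepB (s : String) (q : List String) (hq : ∀ d ∈ q, d ≠ "") :
    pvKeep s q = pvKeepB s q := by
  unfold pvKeep pvKeepB
  rw [decide_eq_decide.2 ?_]
  cases q with
  | nil => simp [pvFirstNonEmpty]
  | cons d q' =>
    have hd : d ≠ "" := hq d List.mem_cons_self
    have hs0 : PySem.Str.len s = 0 ↔ s = "" := by
      rw [pvLen_zero_iff, pvToList_nil_iff]
    rw [hs0]
    simp [pvFirstNonEmpty, hd]

theorem pvFirstNonEmpty_mem (q : List String) (d : String)
    (h : pvFirstNonEmpty q = some d) : d ∈ q := by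
  induction q with
  | nil => simp [pvFirstNonEmpty] at h
  | cons x xs ih =>
    by_cases hx : x = ""
    · simp only [pvFirstNonEmpty, if_pos hx] at h
      exact List.mem_cons_of_mem _ (ih h)
    · simp only [pvFirstNonEmpty, if_neg hx, Option.some_inj] at h
      subst h
      exact List.mem_cons_self

-- ===== VERDICT (by name: the statement is the Claim_ definition above) =====
theorem findPermutationsOfDigits_spec : Claim_equal_findPermutationsOfDigits := by
  intro digitsToUse stringSoFar _ hpre
  unfold Spec_findPermutationsOfDigits
  rw [pvA_normal digitsToUse.length digitsToUse stringSoFar rfl, pvB_normal]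
  congr 1
  apply List.filter_congr
  intro q hq
  have hsub := pvPermsN_mem digitsToUse.length digitsToUse q hq
  by_cases hs : stringSoFar = ""
  · by_cases hz : "0" ∈ digitsToUse
    · -- then "" ∉ digitsToUse, so the two filters coincide elementwise
      apply pvKeep_eq_keepB
      intro d hd he
      subst he
      exact hpre ⟨hsub "" hd, hs, hz⟩
    · -- no "0" among the digits: both filters keep everything
      have hk : pvKeep stringSoFar q = true := by
        unfold pvKeep
        simp only [Bool.not_eq_true', decide_eq_false_iff_not]
        rintro ⟨-, hf⟩
        exact hz (hsub "0" (pvFirstNonEmpty_mem q "0" hf))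
      have hkB : pvKeepB stringSoFar q = true := by
        unfold pvKeepB
        simp only [Bool.not_eq_true', decide_eq_false_iff_not]
        rintro ⟨-, hne, hhd⟩
        cases q with
        | nil => exact hne rfl
        | cons x xs =>
          simp only [List.getD_cons_zero] at hhd
          exact hz (hsub "0" (hhd ▸ List.mem_cons_self))
      rw [hk, hkB]
  · -- nonempty stringSoFar: neither filter ever fires
    unfold pvKeep pvKeepB
    simp [hs]
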